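-- pv_equiv track=rewrite | github.com/isaac-0414/UniversalKG | utils/kg_gen.py | format_json_answer
-- ===== SOURCE A (Python) =====
-- def format_json_answer(s: str) -> str:
--     """
--     If a string contains "```json" and "```", remove them and return the stuff at the middle fo them,
--     else return the string itself
--
--     Parameters:
--     a (str): the input string containing a JSON of interest
--
--     Returns:
--     str: JSON as a string
--     """
--     start_tag = "```json"
--     end_tag = "```"
--
--     if start_tag in s and end_tag in s:
--         s = s[s.index(start_tag) + len(start_tag): s.rindex(end_tag)]
--
--     # remove all the line breaks
--     s = s.replace("\n", "")
--
--     new_s = ""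
--     for i in range(0, len(s)):
--         if s[i] == "\'":
--             is_quote_inside_value = True
--             j = i + 1
--             while j < len(s):
--                 if s[j] == " ":
--                     j += 1
--                 else:
--                     if s[j] == "," or s[j] == ":" or s[j] == "{" or s[j] == "}" or s[j] == "[" or s[j] == "]":
--                         is_quote_inside_value = False
--                     break
--             j = i - 1
--             if is_quote_inside_value:
--                 while j >= 0:
--
--                     if s[j] == " ":
--                         j -= 1
--                     else:
--                         if s[j] == "\\" or s[j] == "," or s[j] == ":" or s[j] == "{" or s[j] == "}" or s[j] == "[" or s[j] == "]":
--                             is_quote_inside_value = False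
--                         break
--             if is_quote_inside_value:
--                 new_s += "\\\'"
--             else:
--                 new_s += "\'"
--
--         elif s[i] == "\"":
--             is_quote_inside_value = True
--             j = i + 1
--             while j < len(s):
--                 if s[j] == " ":
--                     j += 1
--                 else:
--                     if s[j] == "," or s[j] == ":" or s[j] == "{" or s[j] == "}" or s[j] == "[" or s[j] == "]":
--                         is_quote_inside_value = False
--                     break
--             j = i - 1
--             if is_quote_inside_value:
--                 while j >= 0:
--                     if s[j] == " ":
--                         j -= 1
--                     else:
--                         if s[j] == "\\" or s[j] == "," or s[j] == ":" or s[j] == "{" or s[j] == "}" or s[j] == "[" or s[j] == "]":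
--                             is_quote_inside_value = False
--                         break
--             if is_quote_inside_value:
--                 new_s += "\\\""
--             else:
--                 new_s += "\""
--
--         else:
--             new_s += s[i]
--     return new_s
-- ===== SOURCE B (Python) =====
-- _DELIMS = {",", ":", "{", "}", "[", "]"}
-- _PDELIMS = {"\\", ",", ":", "{", "}", "[", "]"}
--
-- def format_json_answer(s: str) -> str:
--     if "```json" in s and "```" in s:
--         s = s[s.index("```json") + 7: s.rindex("```")]
--     s = s.replace("\n", "")
--     n = len(s)
--     # nxt[i] = first non-space character at or after position i (None if there is none)
--     nxt = [None] * (n + 1)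
--     for i in range(n - 1, -1, -1):
--         nxt[i] = nxt[i + 1] if s[i] == " " else s[i]
--     out = []
--     prev = None  # last non-space character before the current position
--     for i, c in enumerate(s):
--         if (c == "'" or c == '"') and nxt[i + 1] not in _DELIMS and prev not in _PDELIMS:
--             out.append("\\" + c)
--         else:
--             out.append(c)
--         if c != " ":
--             prev = c
--     return "".join(out)
-- ===== Notes on version B (the rewrite author's own statement) =====
-- stated objective: alternative
-- what changed: Replaced the per-quote inner while-loops that rescan spaces forward and backward with a precomputed next-non-space array plus a running previous-non-space character, so each quote decision is a pair of O(1) lookups.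
import Mathlib
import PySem

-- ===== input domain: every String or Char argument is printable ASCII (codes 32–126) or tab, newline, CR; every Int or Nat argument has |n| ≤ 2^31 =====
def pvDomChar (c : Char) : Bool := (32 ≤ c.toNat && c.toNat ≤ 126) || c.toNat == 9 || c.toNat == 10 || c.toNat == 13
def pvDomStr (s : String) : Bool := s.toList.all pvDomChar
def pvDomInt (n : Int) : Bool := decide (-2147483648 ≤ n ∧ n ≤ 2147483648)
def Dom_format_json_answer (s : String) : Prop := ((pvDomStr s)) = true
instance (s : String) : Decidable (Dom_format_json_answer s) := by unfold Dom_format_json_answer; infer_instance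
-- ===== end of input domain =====

-- B replaces A's per-quote forward/backward space-rescanning loops with a precomputed
-- next-non-space array and a running previous-non-space character (one pair of lookups per quote).


-- ===== PORT A =====
-- A's inner forward while-loop from j = i+1: skip spaces; a delimiter makes the quote "not
-- inside a value"; running off the end leaves it True.
def pvA_fwd (l : List Char) : Bool :=
  match l with
  | [] => true
  | c :: rest =>
    if c = ' ' then pvA_fwd rest
    else !(c = ',' || c = ':' || c = '{' || c = '}' || c = '[' || c = ']')

-- A's inner backward while-loop from j = i-1 (argument = the reversed prefix before i).
def pvA_bwd (l : List Char) : Bool :=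
  match l with
  | [] => true
  | c :: rest =>
    if c = ' ' then pvA_bwd rest
    else !(c = '\\' || c = ',' || c = ':' || c = '{' || c = '}' || c = '[' || c = ']')

-- A's main for-loop over i; revPre is the (reversed) prefix s[:i], rest is s[i:].
def pvA_go (revPre rest : List Char) : List Char :=
  match rest with
  | [] => []
  | c :: tl =>
    if c = '\'' then
      (if (let v := pvA_fwd tl; if v then pvA_bwd revPre else v)
       then ['\\', '\''] else ['\'']) ++ pvA_go (c :: revPre) tl
    else if c = '"' then
      (if (let v := pvA_fwd tl; if v then pvA_bwd revPre else v)
       then ['\\', '"'] else ['"']) ++ pvA_go (c :: revPre) tl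
    else c :: pvA_go (c :: revPre) tl

def format_json_answer (s : String) : String :=
  let s :=
    if PySem.Str.isIn "```json" s && PySem.Str.isIn "```" s then
      PySem.Str.slice s (some (PySem.Str.find s "```json" + 7)) (some (PySem.Str.rfind s "```"))
    else s
  let s := PySem.Str.replace s "\n" ""
  String.ofList (pvA_go [] s.toList)

-- ===== PORT B =====
def pvB_delims : List Char := [',', ':', '{', '}', '[', ']']
def pvB_pdelims : List Char := ['\\', ',', ':', '{', '}', '[', ']']

-- Source B's backward pass: nxt[i] = first non-space character at or after position i
-- (list of length n+1, last entry none).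
def pvB_nxt (l : List Char) : List (Option Char) :=
  match l with
  | [] => [none]
  | c :: tl =>
    let r := pvB_nxt tl
    (if c = ' ' then r.headD none else some c) :: r

-- Source B's main loop: prev = last non-space char so far, nxts = the nxt array from position i on.
def pvB_go (prev : Option Char) (rest : List Char) (nxts : List (Option Char)) : List Char :=
  match rest with
  | [] => []
  | c :: tl =>
    let after := nxts.tail.headD none
    (if (c = '\'' || c = '"')
        && !(decide (after ∈ pvB_delims.map some))
        && !(decide (prev ∈ pvB_pdelims.map some))
     then ['\\', c] else [c]) ++ pvB_go (if c = ' ' then prev else some c) tl nxts.tail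

def format_json_answer_alt (s : String) : String :=
  let s :=
    if PySem.Str.isIn "```json" s && PySem.Str.isIn "```" s then
      PySem.Str.slice s (some (PySem.Str.find s "```json" + 7)) (some (PySem.Str.rfind s "```"))
    else s
  let s := PySem.Str.replace s "\n" ""
  String.ofList (pvB_go none s.toList (pvB_nxt s.toList))

-- ===== PRECONDITION & SPEC =====
def Spec_format_json_answer (s : String) (out : String) : Prop := out = format_json_answer_alt s
instance (s : String) (out : String) : Decidable (Spec_format_json_answer s out) := by unfold Spec_format_json_answer; infer_instance

-- ===== CLAIM (what is proved, stated in full; the proofs are below) =====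
def Claim_equal_format_json_answer : Prop := ∀ (s : String), Dom_format_json_answer s → Spec_format_json_answer s (format_json_answer s)

-- ===== LEMMAS AND PROOFS =====

-- ghost: first non-space character of a list (= B's prev over the reversed prefix)
def pvFindNS (l : List Char) : Option Char :=
  match l with
  | [] => none
  | c :: tl => if c = ' ' then pvFindNS tl else some c

theorem pvA_fwd_eq (l : List Char) :
    pvA_fwd l = !(decide ((pvB_nxt l).headD none ∈ pvB_delims.map some)) := by
  induction l with
  | nil => decide
  | cons c tl ih =>
    by_cases hc : c = ' '
    · simp [pvA_fwd, pvB_nxt, hc, ih]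
    · simp [pvA_fwd, pvB_nxt, hc, pvB_delims]
      ac_rfl

theorem pvA_bwd_eq (l : List Char) :
    pvA_bwd l = !(decide (pvFindNS l ∈ pvB_pdelims.map some)) := by
  induction l with
  | nil => decide
  | cons c tl ih =>
    by_cases hc : c = ' '
    · simp [pvA_bwd, pvFindNS, hc, ih]
    · simp [pvA_bwd, pvFindNS, hc, pvB_pdelims]
      ac_rfl

theorem pvGo_eq (rest : List Char) : ∀ revPre : List Char,
    pvA_go revPre rest = pvB_go (pvFindNS revPre) rest (pvB_nxt rest) := by
  induction rest with
  | nil => intro revPre; rfl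
  | cons c tl ih =>
    intro revPre
    have hnxt : (pvB_nxt (c :: tl)).tail = pvB_nxt tl := rfl
    have hfwd := pvA_fwd_eq tl
    have hbwd := pvA_bwd_eq revPre
    by_cases h1 : c = '\''
    · subst h1
      simp only [pvA_go, pvB_go, hnxt]
      rw [ih ('\'' :: revPre)]
      have hfs : pvFindNS ('\'' :: revPre) = some '\'' := by simp [pvFindNS]
      rw [hfs]
      cases hf : pvA_fwd tl <;> cases hb : pvA_bwd revPre <;> simp_all
    · by_cases h2 : c = '"'
      · subst h2
        simp only [pvA_go, pvB_go, hnxt]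
        rw [ih ('"' :: revPre)]
        have hfs : pvFindNS ('"' :: revPre) = some '"' := by simp [pvFindNS]
        rw [hfs]
        cases hf : pvA_fwd tl <;> cases hb : pvA_bwd revPre <;> simp_all
      · simp only [pvA_go, pvB_go, hnxt, if_neg h1, if_neg h2]
        rw [ih (c :: revPre)]
        have hns : pvFindNS (c :: revPre) = if c = ' ' then pvFindNS revPre else some c := rfl
        by_cases hsp : c = ' '
        · subst hsp; simp [pvFindNS]
        · simp [hns, hsp, h1, h2]

-- ===== VERDICT (by name: the statement is the Claim_ definition above) =====
theorem format_json_answer_spec : Claim_equal_format_json_answer := by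
  intro s _
  unfold Spec_format_json_answer format_json_answer format_json_answer_alt
  simp only []
  rw [pvGo_eq]
  rfl
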